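-- pv_equiv track=rewrite | github.com/CatherineShm/Python_homework_week_2 | zad_3_3_operacje_na_listach.py | difference_max_min
-- ===== SOURCE A (Python) =====
-- def difference_max_min(numbers=[]):
--     """
--     This function count the difference between the max and the min numbers.
--     :param args: numbers
--     :return: the difference between the max and the min
--     """
--     if numbers == []:
--         return 0
--     min = numbers[0]
--     max = numbers[0]
--     for number in numbers:
--         if min > number:
--             min = number
--         if max < number:
--             max = number
--     return max - min
-- ===== SOURCE B (Python) =====
-- def difference_max_min(numbers=[]):
--     if numbers == []:
--         return 0
--     s = sorted(numbers)
--     return s[-1] - s[0]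
-- ===== Notes on version B (the rewrite author's own statement) =====
-- stated objective: alternative
-- what changed: Replaces the fused one-pass min/max tracking loop with sort-then-read-endpoints: sort a copy and subtract the first sorted element from the last.
import Mathlib
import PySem

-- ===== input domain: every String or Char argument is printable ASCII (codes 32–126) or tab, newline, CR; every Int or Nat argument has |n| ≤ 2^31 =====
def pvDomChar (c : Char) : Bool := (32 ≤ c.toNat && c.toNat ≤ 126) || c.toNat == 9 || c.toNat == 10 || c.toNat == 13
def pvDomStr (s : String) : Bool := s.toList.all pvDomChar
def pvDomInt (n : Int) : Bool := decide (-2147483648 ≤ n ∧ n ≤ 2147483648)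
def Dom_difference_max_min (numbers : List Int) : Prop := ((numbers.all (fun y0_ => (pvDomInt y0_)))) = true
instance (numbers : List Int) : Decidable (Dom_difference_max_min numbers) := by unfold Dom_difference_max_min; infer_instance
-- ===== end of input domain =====

-- B replaces A's fused one-pass min/max tracking loop with sort-then-read-endpoints (alternative decomposition, not faster).

-- ===== PORT A =====
-- for-loop tracking (min, max), then max - min; empty list returns 0
def difference_max_min (numbers : List Int) : Int :=
  if numbers = [] then 0
  else
    let h := PySem.List.pyGetD numbers 0 0
    let p := numbers.foldl
      (fun (st : Int × Int) number =>
        let mn := if st.1 > number then number else st.1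
        let mx := if st.2 < number then number else st.2
        (mn, mx)) (h, h)
    p.2 - p.1

-- ===== PORT B =====
-- guard empty, sort a copy, return last sorted element minus first
def difference_max_min_alt (numbers : List Int) : Int :=
  if numbers = [] then 0
  else
    let s := PySem.List.sorted numbers (fun x => x) false
    PySem.List.pyGetD s (-1) 0 - PySem.List.pyGetD s 0 0

-- ===== PRECONDITION & SPEC =====
def Spec_difference_max_min (numbers : List Int) (out : Int) : Prop := out = difference_max_min_alt numbers
instance (numbers : List Int) (out : Int) : Decidable (Spec_difference_max_min numbers out) := by unfold Spec_difference_max_min; infer_instance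

-- ===== CLAIM (what is proved, stated in full; the proofs are below) =====
def Claim_equal_difference_max_min : Prop := ∀ (numbers : List Int), Dom_difference_max_min numbers → Spec_difference_max_min numbers (difference_max_min numbers)

-- ===== LEMMAS AND PROOFS =====

-- A's loop body computes (min st.1 n, max st.2 n): the whole fold is the pair of min- and max-folds
theorem foldA_eq_min_max (xs : List Int) (a b : Int) :
    xs.foldl (fun (st : Int × Int) number =>
        let mn := if st.1 > number then number else st.1
        let mx := if st.2 < number then number else st.2
        (mn, mx)) (a, b)
      = (xs.foldl min a, xs.foldl max b) := by
  induction xs generalizing a b with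
  | nil => rfl
  | cons x l ih =>
    have h1 : (if a > x then x else a) = min a x := by rw [min_def]; split_ifs <;> omega
    have h2 : (if b < x then x else b) = max b x := by rw [max_def]; split_ifs <;> omega
    dsimp only [List.foldl_cons]
    rw [h1, h2, ih]

theorem foldl_min_le_init (xs : List Int) (a : Int) : xs.foldl min a ≤ a := by
  induction xs generalizing a with
  | nil => simp
  | cons x l ih => exact le_trans (ih (min a x)) (min_le_left a x)

theorem foldl_min_le (xs : List Int) (a : Int) : ∀ y ∈ xs, xs.foldl min a ≤ y := by
  induction xs generalizing a with
  | nil => simp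
  | cons x l ih =>
    intro y hy
    rcases List.mem_cons.mp hy with h | h
    · subst h
      exact le_trans (foldl_min_le_init l (min a y)) (min_le_right a y)
    · exact ih (min a x) y h

theorem foldl_min_mem (xs : List Int) (a : Int) : xs.foldl min a ∈ a :: xs := by
  induction xs generalizing a with
  | nil => simp
  | cons x l ih =>
    simp only [List.foldl_cons]
    rcases List.mem_cons.mp (ih (min a x)) with h | h
    · rcases min_choice a x with hc | hc <;> rw [h, hc] <;> simp
    · exact List.mem_cons_of_mem _ (List.mem_cons_of_mem _ h)

theorem foldl_max_ge_init (xs : List Int) (a : Int) : a ≤ xs.foldl max a := by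
  induction xs generalizing a with
  | nil => simp
  | cons x l ih => exact le_trans (le_max_left a x) (ih (max a x))

theorem foldl_max_ge (xs : List Int) (a : Int) : ∀ y ∈ xs, y ≤ xs.foldl max a := by
  induction xs generalizing a with
  | nil => simp
  | cons x l ih =>
    intro y hy
    rcases List.mem_cons.mp hy with h | h
    · subst h
      exact le_trans (le_max_right a y) (foldl_max_ge_init l (max a y))
    · exact ih (max a x) y h

theorem foldl_max_mem (xs : List Int) (a : Int) : xs.foldl max a ∈ a :: xs := by
  induction xs generalizing a with
  | nil => simp
  | cons x l ih =>
    simp only [List.foldl_cons]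
    rcases List.mem_cons.mp (ih (max a x)) with h | h
    · rcases max_choice a x with hc | hc <;> rw [h, hc] <;> simp
    · exact List.mem_cons_of_mem _ (List.mem_cons_of_mem _ h)

-- in a (≤)-pairwise list every element is ≤ the last one
theorem pairwise_le_getLast (s : List Int) (hne : s ≠ []) (hp : s.Pairwise (· ≤ ·)) :
    ∀ y ∈ s, y ≤ s.getLast hne := by
  induction s with
  | nil => simp at hne
  | cons x t ih =>
    intro y hy
    cases t with
    | nil => simp at hy; simp [hy]
    | cons z u =>
      have hrest := (List.pairwise_cons.mp hp).2
      have hlast_eq : (x :: z :: u).getLast hne = (z :: u).getLast (by simp) := by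
        simp [List.getLast_cons]
      rcases List.mem_cons.mp hy with h | h
      · subst h
        have hle : y ≤ z := (List.pairwise_cons.mp hp).1 z (by simp)
        have := ih (by simp) hrest z (by simp)
        rw [hlast_eq]; exact le_trans hle this
      · rw [hlast_eq]; exact ih (by simp) hrest y h

theorem pyGetD_neg_one_getLast (s : List Int) (h : s ≠ []) : PySem.List.pyGetD s (-1) 0 = s.getLast h := by
  have h1 : 1 ≤ s.length := by cases s; simp at h; simp
  simp [PySem.List.pyGetD, PySem.List.pyIdx?, PySem.List.pyGet?, h1, List.getLast_eq_getElem]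
  rw [List.getElem?_eq_getElem (by omega)]
  rfl

-- ===== VERDICT (by name: the statement is the Claim_ definition above) =====
theorem difference_max_min_spec : Claim_equal_difference_max_min := by
  intro numbers _
  unfold Spec_difference_max_min difference_max_min difference_max_min_alt
  by_cases hne : numbers = []
  · simp [hne]
  · simp only [hne, ite_false]
    obtain ⟨x, xs, rfl⟩ := List.exists_cons_of_ne_nil hne
    set L : List Int := x :: xs with hL
    have hgh : PySem.List.pyGetD L 0 0 = x := by
      simp [hL, PySem.List.pyGetD, PySem.List.pyIdx?, PySem.List.pyGet?]
    rw [hgh, foldA_eq_min_max]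
    set s := PySem.List.sorted L (fun x => x) false with hs
    have hperm : s.Perm L := PySem.List.sorted_perm L (fun x => x) false
    have hsne : s ≠ [] := by
      intro h0; rw [h0] at hperm; have := hperm.length_eq; simp [hL] at this
    have hpw : s.Pairwise (· ≤ ·) := by
      have := PySem.List.sorted_pairwise L (fun x => x)
      simpa using this
    obtain ⟨y, t, hyt⟩ := List.exists_cons_of_ne_nil hsne
    have hhead : ∀ z ∈ L, y ≤ z := PySem.List.key_head_sorted_le L (fun x => x) hyt
    have hs0 : PySem.List.pyGetD s 0 0 = y := by
      simp [hyt, PySem.List.pyGetD, PySem.List.pyIdx?, PySem.List.pyGet?]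
    have hlast := pyGetD_neg_one_getLast s hsne
    set M := s.getLast hsne with hM
    have hMmem : M ∈ L := hperm.mem_iff.mp (List.getLast_mem hsne)
    have hMge : ∀ z ∈ L, z ≤ M := fun z hz => pairwise_le_getLast s hsne hpw z (hperm.mem_iff.mpr hz)
    have hymem : y ∈ L := hperm.mem_iff.mp (by simp [hyt])
    have hminmem : L.foldl min x ∈ L := by
      rcases List.mem_cons.mp (foldl_min_mem L x) with h | h
      · rw [h]; simp [hL]
      · exact h
    have hmaxmem : L.foldl max x ∈ L := by
      rcases List.mem_cons.mp (foldl_max_mem L x) with h | h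
      · rw [h]; simp [hL]
      · exact h
    have hmin : L.foldl min x = y :=
      le_antisymm (foldl_min_le L x y hymem) (hhead _ hminmem)
    have hmax : L.foldl max x = M :=
      le_antisymm (hMge _ hmaxmem) (foldl_max_ge L x M hMmem)
    rw [hlast, hs0, hmin, hmax]
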